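-- pv_equiv track=rewrite | github.com/ktse/Benchaholics | main.py | getScrapedEvens
-- ===== SOURCE A (Python) =====
-- def getScrapedEvens(infoDict):
--   title = []
--   imgURL = []
--   imgURLodds = []
--   count = 0
--   for name in infoDict:
--     title.append(name)
--     for pic in infoDict[name]:
--       if count % 2 == 0:
--         imgURL.append(pic)
--       else:
--         imgURLodds.append(pic)
--       count +=1
--   return [title,imgURL,imgURLodds]
-- ===== SOURCE B (Python) =====
-- def getScrapedEvens(infoDict):
--   flat = [pic for name in infoDict for pic in infoDict[name]]
--   return [list(infoDict), flat[::2], flat[1::2]]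
-- ===== Notes on version B (the rewrite author's own statement) =====
-- stated objective: simpler
-- what changed: Replaces the running global counter and the if/else parity branch with a flatten-then-stride-slice decomposition: all nested values are flattened once and the even/odd partition is produced by flat[::2] and flat[1::2].
import Mathlib
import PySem

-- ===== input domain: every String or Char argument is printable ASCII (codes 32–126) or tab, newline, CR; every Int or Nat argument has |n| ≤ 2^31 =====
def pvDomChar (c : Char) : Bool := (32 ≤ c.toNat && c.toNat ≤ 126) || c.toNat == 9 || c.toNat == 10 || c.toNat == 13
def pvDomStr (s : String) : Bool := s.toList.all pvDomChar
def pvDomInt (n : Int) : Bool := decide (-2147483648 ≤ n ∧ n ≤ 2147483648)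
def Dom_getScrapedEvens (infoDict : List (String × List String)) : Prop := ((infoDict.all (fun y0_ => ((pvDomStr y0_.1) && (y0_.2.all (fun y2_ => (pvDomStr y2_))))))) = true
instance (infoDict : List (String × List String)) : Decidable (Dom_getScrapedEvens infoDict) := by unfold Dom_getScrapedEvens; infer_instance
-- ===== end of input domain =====

-- B replaces A's running global counter and parity branch by flatten-then-stride-slice (objective: simpler).


-- ===== PORT A =====
-- literal port of A: one pass over the dict, a global Int counter, parity branch into two accumulators
def getScrapedEvens (infoDict : List (String × List String)) : List (List String) :=
  let st := infoDict.foldl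
    (fun (acc : List String × List String × List String × Int) nv =>
      let inner := nv.2.foldl
        (fun (a : List String × List String × Int) pic =>
          if a.2.2 % 2 == 0 then (a.1 ++ [pic], a.2.1, a.2.2 + 1)
          else (a.1, a.2.1 ++ [pic], a.2.2 + 1))
        (acc.2.1, acc.2.2.1, acc.2.2.2)
      (acc.1 ++ [nv.1], inner.1, inner.2.1, inner.2.2))
    ([], [], [], (0 : Int))
  [st.1, st.2.1, st.2.2.1]

-- ===== PORT B =====
-- literal port of Source B: flatten all nested values, then stride-slice flat[::2] and flat[1::2]
def getScrapedEvens_alt (infoDict : List (String × List String)) : List (List String) :=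
  let flat := infoDict.flatMap Prod.snd
  [infoDict.map Prod.fst,
   (PySem.List.slice? flat none none 2).getD [],
   (PySem.List.slice? flat (some 1) none 2).getD []]

-- ===== PRECONDITION & SPEC =====
def Spec_getScrapedEvens (infoDict : List (String × List String)) (out : List (List String)) : Prop := out = getScrapedEvens_alt infoDict
instance (infoDict : List (String × List String)) (out : List (List String)) : Decidable (Spec_getScrapedEvens infoDict out) := by unfold Spec_getScrapedEvens; infer_instance

-- ===== CLAIM (what is proved, stated in full; the proofs are below) =====
def Claim_equal_getScrapedEvens : Prop := ∀ (infoDict : List (String × List String)), Dom_getScrapedEvens infoDict → Spec_getScrapedEvens infoDict (getScrapedEvens infoDict)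

-- ===== LEMMAS AND PROOFS =====

-- elements at even (p = true) / odd (p = false) positions
def pvStride {α : Type} (p : Bool) : List α → List α
  | [] => []
  | x :: xs => if p then x :: pvStride (!p) xs else pvStride (!p) xs

theorem pvStride_append {α : Type} (a b : List α) (p : Bool) :
    pvStride p (a ++ b) = pvStride p a ++ pvStride (p == decide (a.length % 2 = 0)) b := by
  induction a generalizing p with
  | nil => simp [pvStride]
  | cons x xs ih =>
    simp only [List.cons_append, pvStride, ih (!p)]
    have h : ((!p) == decide (xs.length % 2 = 0)) = (p == decide ((x :: xs).length % 2 = 0)) := by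
      rcases p <;> rcases Nat.mod_two_eq_zero_or_one xs.length with h | h <;>
        simp [List.length_cons, h, Nat.add_mod, Nat.mod_self]
    rw [h]
    cases p <;> simp

theorem pvParity_succ (c : Int) : ((c + 1) % 2 == 0) = !(c % 2 == 0) := by
  rcases Int.emod_two_eq c with h | h <;> simp [h] <;> omega

theorem pvInner_spec (l e o : List String) (c : Int) :
    l.foldl (fun (a : List String × List String × Int) pic =>
        if a.2.2 % 2 == 0 then (a.1 ++ [pic], a.2.1, a.2.2 + 1)
        else (a.1, a.2.1 ++ [pic], a.2.2 + 1)) (e, o, c)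
    = (e ++ pvStride (c % 2 == 0) l, o ++ pvStride (!(c % 2 == 0)) l, c + l.length) := by
  induction l generalizing e o c with
  | nil => simp [pvStride]
  | cons x xs ih =>
    simp only [List.foldl_cons]
    by_cases h : c % 2 = 0
    · have hb : (c % 2 == 0) = true := by simp [h]
      rw [if_pos (by simp [h])]
      rw [ih]
      simp [pvStride, hb, pvParity_succ, List.length_cons]
      omega
    · have hb : (c % 2 == 0) = false := by simp [h]
      rw [if_neg (by simp [h])]
      rw [ih]
      simp [pvStride, hb, pvParity_succ, List.length_cons]
      omega

theorem pvParity_add (c : Int) (n : Nat) :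
    ((c + n) % 2 == 0) = ((c % 2 == 0) == decide (n % 2 = 0)) := by
  rcases Int.emod_two_eq c with h | h <;> rcases Nat.mod_two_eq_zero_or_one n with h2 | h2 <;>
    simp [h, h2] <;> omega

theorem pvOuter_spec (d : List (String × List String)) (t e o : List String) (c : Int) :
    d.foldl
      (fun (acc : List String × List String × List String × Int) nv =>
        let inner := nv.2.foldl
          (fun (a : List String × List String × Int) pic =>
            if a.2.2 % 2 == 0 then (a.1 ++ [pic], a.2.1, a.2.2 + 1)
            else (a.1, a.2.1 ++ [pic], a.2.2 + 1))
          (acc.2.1, acc.2.2.1, acc.2.2.2)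
        (acc.1 ++ [nv.1], inner.1, inner.2.1, inner.2.2))
      (t, e, o, c)
    = (t ++ d.map Prod.fst,
       e ++ pvStride (c % 2 == 0) (d.flatMap Prod.snd),
       o ++ pvStride (!(c % 2 == 0)) (d.flatMap Prod.snd),
       c + (d.flatMap Prod.snd).length) := by
  induction d generalizing t e o c with
  | nil => simp [pvStride]
  | cons nv rest ih =>
    simp only [List.foldl_cons]
    rw [pvInner_spec]
    dsimp only
    rw [ih, List.map_cons, List.flatMap_cons, pvStride_append, pvStride_append, pvParity_add]
    have hflip : ((!(c % 2 == 0)) == decide (nv.2.length % 2 = 0))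
        = !((c % 2 == 0) == decide (nv.2.length % 2 = 0)) := by
      cases (c % 2 == 0) <;> cases decide (nv.2.length % 2 = 0) <;> rfl
    rw [hflip]
    simp [List.length_append, List.append_assoc]
    omega

-- B side: the two strided slices compute pvStride
theorem pvFmE {α : Type} (xs : List α) :
    List.filterMap (fun k : Nat => xs[2 * k]?) (List.range ((xs.length + 1) / 2))
      = pvStride true xs := by
  match xs with
  | [] => simp [pvStride]
  | [a] => simp [pvStride, List.range_succ]
  | a :: b :: rest =>
    have hlen : ((a :: b :: rest).length + 1) / 2 = (rest.length + 1) / 2 + 1 := by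
      simp only [List.length_cons]; omega
    rw [hlen, List.range_succ_eq_map, List.filterMap_cons, List.filterMap_map]
    have h0 : (a :: b :: rest)[2 * 0]? = some a := rfl
    rw [h0]
    have hrec : List.filterMap ((fun k : Nat => (a :: b :: rest)[2 * k]?) ∘ (· + 1)) (List.range ((rest.length + 1) / 2))
        = List.filterMap (fun k : Nat => rest[2 * k]?) (List.range ((rest.length + 1) / 2)) := by
      apply List.filterMap_congr
      intro k _
      show (a :: b :: rest)[2 * (k + 1)]? = rest[2 * k]?
      have : 2 * (k + 1) = 2 * k + 1 + 1 := by omega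
      rw [this]
      simp
    rw [hrec, pvFmE rest]
    simp [pvStride]

theorem pvFmO {α : Type} (xs : List α) :
    List.filterMap (fun k : Nat => xs[1 + 2 * k]?) (List.range (xs.length / 2))
      = pvStride false xs := by
  match xs with
  | [] => simp [pvStride]
  | [a] => simp [pvStride]
  | a :: b :: rest =>
    have hlen : (a :: b :: rest).length / 2 = rest.length / 2 + 1 := by
      simp only [List.length_cons]; omega
    rw [hlen, List.range_succ_eq_map, List.filterMap_cons, List.filterMap_map]
    have h0 : (a :: b :: rest)[1 + 2 * 0]? = some b := rfl
    rw [h0]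
    have hrec : List.filterMap ((fun k : Nat => (a :: b :: rest)[1 + 2 * k]?) ∘ (· + 1)) (List.range (rest.length / 2))
        = List.filterMap (fun k : Nat => rest[1 + 2 * k]?) (List.range (rest.length / 2)) := by
      apply List.filterMap_congr
      intro k _
      show (a :: b :: rest)[1 + 2 * (k + 1)]? = rest[1 + 2 * k]?
      have : 1 + 2 * (k + 1) = 1 + 2 * k + 1 + 1 := by omega
      rw [this]
      simp
    rw [hrec, pvFmO rest]
    simp [pvStride]

theorem pvSliceE {α : Type} (xs : List α) :
    PySem.List.slice? xs none none 2 = some (pvStride true xs) := by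
  rw [PySem.List.slice?]
  simp only [PySem.List.sliceIndices]
  norm_num
  rw [← pvFmE xs]
  have hcount : (if 0 < xs.length then (((xs.length : Int) + 2 - 1) / 2).toNat else 0)
      = (xs.length + 1) / 2 := by
    split_ifs with h <;> omega
  rw [hcount]
  apply List.filterMap_congr
  intro k _
  congr 1

theorem pvSliceO {α : Type} (xs : List α) :
    PySem.List.slice? xs (some 1) none 2 = some (pvStride false xs) := by
  rw [PySem.List.slice?]
  simp only [PySem.List.sliceIndices]
  norm_num
  match xs with
  | [] => simp [pvStride]
  | y :: ys =>
    have hmin : min (1 : Int) ((y :: ys).length : Int) = 1 :=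
      min_eq_left (by simp only [List.length_cons]; push_cast; omega)
    rw [hmin]
    have hcount : (if 1 < (y :: ys).length then ((((y :: ys).length : Int) - 1 + 2 - 1) / 2).toNat else 0)
        = (y :: ys).length / 2 := by
      split_ifs with h <;> omega
    rw [hcount]
    rw [← pvFmO (y :: ys)]
    apply List.filterMap_congr
    intro k _
    congr 1

-- ===== VERDICT (by name: the statement is the Claim_ definition above) =====
theorem getScrapedEvens_spec : Claim_equal_getScrapedEvens := by
  intro d _
  show getScrapedEvens d = getScrapedEvens_alt d
  rw [getScrapedEvens, getScrapedEvens_alt]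
  simp only [pvOuter_spec, pvSliceE, pvSliceO]
  norm_num
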